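-- pv_equiv track=rewrite | github.com/nsakib1017/pyllmpatch | utils/outdated/file-metadata-extractor.py | remove_string_literals
-- ===== SOURCE A (Python) =====
-- def remove_string_literals(s: str) -> str:
--     out, i, n = [], 0, len(s)
--     while i < n:
--         ch = s[i]
--         if ch in ("'", '"'):
--             q = ch
--             if i+2 < n and s[i:i+3] == q*3:
--                 i += 3
--                 while i+2 < n and s[i:i+3] != q*3:
--                     i += 1
--                 i += 3 if i+2 < n else 0
--             else:
--                 i += 1
--                 while i < n and s[i] != q:
--                     if i < n and s[i] == "\\": i += 1
--                     i += 1
--                 i += 1 if i < n else 0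
--         else:
--             out.append(ch); i += 1
--     return "".join(out)
-- ===== SOURCE B (Python) =====
-- def remove_string_literals(s: str) -> str:
--     out = []
--     i, n = 0, len(s)
--     state = None  # None = NORMAL, else (quote_char, is_triple)
--     while i < n:
--         if state is None:
--             c = s[i]
--             if c == "'" or c == '"':
--                 if s[i+1:i+3] == c * 2:
--                     state = (c, True)
--                     i += 3
--                 else:
--                     state = (c, False)
--                     i += 1
--             else:
--                 out.append(c)
--                 i += 1
--         else:
--             q, triple = state
--             if triple:
--                 if i + 2 < n:
--                     if s[i] == q and s[i+1] == q and s[i+2] == q: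
--                         state = None
--                         i += 3
--                     else:
--                         i += 1
--                 else:
--                     state = None
--             else:
--                 c = s[i]
--                 if c == q:
--                     state = None
--                     i += 1
--                 elif c == '\\':
--                     i += 2
--                 else:
--                     i += 1
--     return ''.join(out)
-- ===== Notes on version B (the rewrite author's own statement) =====
-- stated objective: alternative
-- what changed: Replaced A's nested scanning while-loops (inner loops that fast-forward past each literal) by one flat loop over a monotonic index driven by an explicit state machine (NORMAL / in-single-quoted / in-triple-quoted with the remembered quote char).
import Mathlib
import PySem

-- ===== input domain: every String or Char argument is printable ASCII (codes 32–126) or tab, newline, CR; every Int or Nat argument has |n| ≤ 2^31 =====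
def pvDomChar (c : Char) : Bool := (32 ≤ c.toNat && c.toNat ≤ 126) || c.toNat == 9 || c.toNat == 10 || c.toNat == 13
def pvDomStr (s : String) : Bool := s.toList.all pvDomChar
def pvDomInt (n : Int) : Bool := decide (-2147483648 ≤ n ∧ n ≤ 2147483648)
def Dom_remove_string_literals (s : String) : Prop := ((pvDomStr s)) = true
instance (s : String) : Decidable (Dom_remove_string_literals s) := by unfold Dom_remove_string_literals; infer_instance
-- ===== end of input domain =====

-- B: same output as A via a single flat loop with an explicit state machine (NORMAL / in-single / in-triple)
-- instead of A's nested scanning while-loops; objective: alternative decomposition, no speed claim.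

-- ===== PORT A =====
-- inner loop `while i+2 < n and s[i:i+3] != q*3: i += 1` followed by `i += 3 if i+2 < n else 0`
-- (slice s[i:i+3] with 0 ≤ i is exactly (cs.drop i).take 3)
def scanTripleA (cs : List Char) (n : Nat) (q : Char) (i : Nat) : Nat :=
  if i + 2 < n then
    if (cs.drop i).take 3 ≠ [q, q, q] then scanTripleA cs n q (i + 1)
    else i + 3
  else i
termination_by n - i

lemma scanTripleA_ge (cs : List Char) (n : Nat) (q : Char) (i : Nat) :
    i ≤ scanTripleA cs n q i := by
  fun_induction scanTripleA cs n q i with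
  | case1 _ _ _ ih => omega
  | case2 => omega
  | case3 => omega

-- inner loop `while i < n and s[i] != q: if s[i] == "\\": i += 1; i += 1` then `i += 1 if i < n else 0`
def scanSingleA (cs : List Char) (n : Nat) (q : Char) (i : Nat) : Nat :=
  if i < n then
    let c := cs.getD i ' '
    if c ≠ q then
      if c = '\\' then scanSingleA cs n q (i + 2) else scanSingleA cs n q (i + 1)
    else i + 1
  else i
termination_by n - i

lemma scanSingleA_ge (cs : List Char) (n : Nat) (q : Char) (i : Nat) :
    i ≤ scanSingleA cs n q i := by
  fun_induction scanSingleA cs n q i <;> omega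

-- the outer `while i < n` loop of A
def loopA (cs : List Char) (n : Nat) (i : Nat) (out : List Char) : List Char :=
  if i < n then
    let ch := cs.getD i ' '
    if ch = '\'' ∨ ch = '"' then
      if i + 2 < n ∧ (cs.drop i).take 3 = [ch, ch, ch] then
        loopA cs n (scanTripleA cs n ch (i + 3)) out
      else
        loopA cs n (scanSingleA cs n ch (i + 1)) out
    else loopA cs n (i + 1) (out ++ [ch])
  else out
termination_by n - i
decreasing_by
  · have := scanTripleA_ge cs n (cs.getD i ' ') (i + 3); omega
  · have := scanSingleA_ge cs n (cs.getD i ' ') (i + 1); omega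
  · omega

def remove_string_literals (s : String) : String :=
  String.ofList (loopA s.toList s.toList.length 0 [])

-- ===== PORT B =====
-- state: none = NORMAL, some (q, false) = inside single/double-quoted, some (q, true) = inside triple-quoted
def loopB (cs : List Char) (n : Nat) (i : Nat) (st : Option (Char × Bool)) (out : List Char) : List Char :=
  if i < n then
    match st with
    | none =>
      let c := cs.getD i ' '
      if c = '\'' ∨ c = '"' then
        -- s[i+1:i+3] == c*2  (slice is exactly (cs.drop (i+1)).take 2)
        if (cs.drop (i + 1)).take 2 = [c, c] then loopB cs n (i + 3) (some (c, true)) out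
        else loopB cs n (i + 1) (some (c, false)) out
      else loopB cs n (i + 1) none (out ++ [c])
    | some (q, false) =>
      let c := cs.getD i ' '
      if c = q then loopB cs n (i + 1) none out
      else if c = '\\' then loopB cs n (i + 2) (some (q, false)) out
      else loopB cs n (i + 1) (some (q, false)) out
    | some (q, true) =>
      if i + 2 < n then
        if cs.getD i ' ' = q ∧ cs.getD (i + 1) ' ' = q ∧ cs.getD (i + 2) ' ' = q then
          loopB cs n (i + 3) none out
        else loopB cs n (i + 1) (some (q, true)) out
      else loopB cs n i none out
  else out
termination_by (n - i, match st with | some (_, true) => 1 | _ => 0)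

def remove_string_literals_alt (s : String) : String :=
  String.ofList (loopB s.toList s.toList.length 0 none [])

-- ===== PRECONDITION & SPEC =====
def Spec_remove_string_literals (s : String) (out : String) : Prop := out = remove_string_literals_alt s
instance (s : String) (out : String) : Decidable (Spec_remove_string_literals s out) := by unfold Spec_remove_string_literals; infer_instance

-- ===== CLAIM (what is proved, stated in full; the proofs are below) =====
def Claim_equal_remove_string_literals : Prop := ∀ (s : String), Dom_remove_string_literals s → Spec_remove_string_literals s (remove_string_literals s)

-- ===== LEMMAS AND PROOFS =====

lemma take_three_eq (cs : List Char) (i : Nat) (h : i + 2 < cs.length) :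
    (cs.drop i).take 3 = [cs.getD i ' ', cs.getD (i + 1) ' ', cs.getD (i + 2) ' '] := by
  have h0 : cs.drop i = cs[i] :: cs.drop (i+1) := List.drop_eq_getElem_cons (by omega)
  have h1 : cs.drop (i+1) = cs[i+1] :: cs.drop (i+2) := List.drop_eq_getElem_cons (by omega)
  have h2 : cs.drop (i+2) = cs[i+2] :: cs.drop (i+3) := List.drop_eq_getElem_cons (by omega)
  rw [h0, h1, h2, List.getD_eq_getElem _ _ (by omega),
      List.getD_eq_getElem _ _ (by omega), List.getD_eq_getElem _ _ (by omega)]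
  rfl

lemma take_two_iff (cs : List Char) (i : Nat) (c : Char) (hi : i < cs.length)
    (hc : cs.getD i ' ' = c) :
    ((cs.drop (i + 1)).take 2 = [c, c]) ↔ (i + 2 < cs.length ∧ (cs.drop i).take 3 = [c, c, c]) := by
  constructor
  · intro h
    have hlen : ((cs.drop (i + 1)).take 2).length = 2 := by rw [h]; rfl
    rw [List.length_take, List.length_drop] at hlen
    have h2 : i + 2 < cs.length := by omega
    refine ⟨h2, ?_⟩
    have h0 : cs.drop i = cs[i] :: cs.drop (i+1) := List.drop_eq_getElem_cons (by omega)
    rw [h0, List.take_succ_cons, h]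
    rw [List.getD_eq_getElem _ _ hi] at hc
    rw [hc]
  · rintro ⟨h2, h3⟩
    have h0 : cs.drop i = cs[i] :: cs.drop (i+1) := List.drop_eq_getElem_cons (by omega)
    rw [h0, List.take_succ_cons] at h3
    exact (List.cons_eq_cons.mp h3).2

lemma bridge (cs : List Char) (k : Nat) : ∀ i, cs.length - i ≤ k →
    (∀ out, loopB cs cs.length i none out = loopA cs cs.length i out) ∧
    (∀ q out, loopB cs cs.length i (some (q, false)) out
        = loopA cs cs.length (scanSingleA cs cs.length q i) out) ∧
    (∀ q out, loopB cs cs.length i (some (q, true)) out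
        = loopA cs cs.length (scanTripleA cs cs.length q i) out) := by
  induction k with
  | zero =>
    intro i hk
    have hin : ¬ i < cs.length := by omega
    have h2 : ¬ i + 2 < cs.length := by omega
    refine ⟨?_, ?_, ?_⟩
    · intro out; rw [loopB, loopA, if_neg hin, if_neg hin]
    · intro q out; rw [loopB, scanSingleA, loopA, if_neg hin, if_neg hin, if_neg hin]
    · intro q out; rw [loopB, scanTripleA, loopA, if_neg hin, if_neg h2, if_neg hin]
  | succ k ih =>
    intro i hk
    by_cases hin : i < cs.length
    case neg =>
      have h2 : ¬ i + 2 < cs.length := by omega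
      refine ⟨?_, ?_, ?_⟩
      · intro out; rw [loopB, loopA, if_neg hin, if_neg hin]
      · intro q out; rw [loopB, scanSingleA, loopA, if_neg hin, if_neg hin, if_neg hin]
      · intro q out; rw [loopB, scanTripleA, loopA, if_neg hin, if_neg h2, if_neg hin]
    case pos =>
      have hnone : ∀ out, loopB cs cs.length i none out = loopA cs cs.length i out := by
        intro out
        rw [loopB, loopA, if_pos hin, if_pos hin]
        show (if cs.getD i ' ' = '\'' ∨ cs.getD i ' ' = '"' then _ else _) = _
        by_cases hq : cs.getD i ' ' = '\'' ∨ cs.getD i ' ' = '"'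
        · rw [if_pos hq, if_pos hq]
          by_cases ht : (cs.drop (i + 1)).take 2 = [cs.getD i ' ', cs.getD i ' ']
          · have hA := (take_two_iff cs i (cs.getD i ' ') hin rfl).1 ht
            rw [if_pos ht, if_pos hA]
            exact (ih (i + 3) (by omega)).2.2 (cs.getD i ' ') out
          · have hA := mt (take_two_iff cs i (cs.getD i ' ') hin rfl).2 ht
            rw [if_neg ht, if_neg hA]
            exact (ih (i + 1) (by omega)).2.1 (cs.getD i ' ') out
        · rw [if_neg hq, if_neg hq]
          exact (ih (i + 1) (by omega)).1 (out ++ [cs.getD i ' '])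
      refine ⟨hnone, ?_, ?_⟩
      · intro q out
        rw [loopB, scanSingleA, if_pos hin, if_pos hin]
        show (if cs.getD i ' ' = q then _ else _) = _
        by_cases hcq : cs.getD i ' ' = q
        · rw [if_pos hcq, if_neg (not_not_intro hcq)]
          exact (ih (i + 1) (by omega)).1 out
        · rw [if_neg hcq, if_pos hcq]
          by_cases hbs : cs.getD i ' ' = '\\'
          · rw [if_pos hbs, if_pos hbs]
            exact (ih (i + 2) (by omega)).2.1 q out
          · rw [if_neg hbs, if_neg hbs]
            exact (ih (i + 1) (by omega)).2.1 q out
      · intro q out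
        rw [loopB, scanTripleA, if_pos hin]
        by_cases h2 : i + 2 < cs.length
        · rw [if_pos h2, if_pos h2]
          by_cases hm : cs.getD i ' ' = q ∧ cs.getD (i + 1) ' ' = q ∧ cs.getD (i + 2) ' ' = q
          · have heq : (cs.drop i).take 3 = [q, q, q] := by
              rw [take_three_eq cs i h2, hm.1, hm.2.1, hm.2.2]
            rw [if_pos hm, if_neg (not_not_intro heq)]
            exact (ih (i + 3) (by omega)).1 out
          · have hne : (cs.drop i).take 3 ≠ [q, q, q] := by
              rw [take_three_eq cs i h2]
              intro hh
              exact hm ⟨(List.cons_eq_cons.mp hh).1,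
                (List.cons_eq_cons.mp (List.cons_eq_cons.mp hh).2).1,
                (List.cons_eq_cons.mp (List.cons_eq_cons.mp (List.cons_eq_cons.mp hh).2).2).1⟩
            rw [if_neg hm, if_pos hne]
            exact (ih (i + 1) (by omega)).2.2 q out
        · rw [if_neg h2, if_neg h2]
          exact hnone out

-- ===== VERDICT (by name: the statement is the Claim_ definition above) =====
theorem remove_string_literals_spec : Claim_equal_remove_string_literals := by
  intro s _
  unfold Spec_remove_string_literals remove_string_literals remove_string_literals_alt
  have h := (bridge s.toList s.toList.length 0 (by omega)).1 []
  rw [h]
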